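-- pv_equiv track=rewrite | github.com/cc-org-au/hermes-agent | memory/core/scripts/core/cortical_lattice_classify.py | first_paragraph_excerpt
-- ===== SOURCE A (Python) =====
-- def first_paragraph_excerpt(body: str, max_len: int = 280) -> str:
--     text = body.strip()
--     if text.startswith("---"):
--         end = text.find("\n---", 3)
--         if end != -1:
--             text = text[end + 4 :].lstrip()
--     buf: list[str] = []
--     for line in text.splitlines():
--         line = line.strip()
--         if not line:
--             if buf:
--                 break
--             continue
--         if line.startswith("#"):
--             continue
--         buf.append(line)
--         if sum(len(x) for x in buf) > max_len:
--             break
--     out = " ".join(buf).strip()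
--     if len(out) > max_len:
--         return out[: max_len - 3].rstrip() + "..."
--     return out or "Hermes workspace procedure (see body)."
-- ===== SOURCE B (Python) =====
-- def first_paragraph_excerpt(body: str, max_len: int = 280) -> str:
--     text = body.strip()
--     if text.startswith("---"):
--         end = text.find("\n---", 3)
--         if end != -1:
--             text = text[end + 4 :].lstrip()
--     # split into blank-line-delimited blocks of stripped lines
--     blocks: list[list[str]] = []
--     cur: list[str] = []
--     for raw in text.splitlines():
--         line = raw.strip()
--         if line:
--             cur.append(line)
--         elif cur:
--             blocks.append(cur)
--             cur = []
--     if cur: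
--         blocks.append(cur)
--     # first block that still has content after dropping headings
--     para: list[str] = []
--     for blk in blocks:
--         content = [l for l in blk if not l.startswith("#")]
--         if content:
--             para = content
--             break
--     # keep only as much of the paragraph as the excerpt budget can use
--     picked: list[str] = []
--     total = 0
--     for l in para:
--         picked.append(l)
--         total += len(l)
--         if total > max_len:
--             break
--     out = " ".join(picked)
--     if len(out) > max_len:
--         return out[: max_len - 3].rstrip() + "..."
--     return out or "Hermes workspace procedure (see body)."
-- ===== Notes on version B (the rewrite author's own statement) =====
-- stated objective: alternative
-- what changed: Replaces A's single streaming loop with interleaved blank-line/length breaks by a phased decomposition: group lines into blank-delimited blocks, pick the first block with non-heading content, then cut that paragraph to the length budget and truncate.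
import Mathlib
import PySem

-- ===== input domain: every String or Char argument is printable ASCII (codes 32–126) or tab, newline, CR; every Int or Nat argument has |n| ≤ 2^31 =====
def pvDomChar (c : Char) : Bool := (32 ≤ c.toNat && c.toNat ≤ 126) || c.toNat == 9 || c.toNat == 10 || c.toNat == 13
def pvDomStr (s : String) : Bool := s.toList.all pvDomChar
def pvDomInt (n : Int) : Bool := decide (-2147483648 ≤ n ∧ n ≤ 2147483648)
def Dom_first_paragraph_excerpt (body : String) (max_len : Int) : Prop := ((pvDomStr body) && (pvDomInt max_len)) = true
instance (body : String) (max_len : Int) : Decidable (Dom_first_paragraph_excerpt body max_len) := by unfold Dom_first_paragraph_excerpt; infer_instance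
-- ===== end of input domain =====

-- B replaces A's single streaming loop (with its interleaved blank-line/length breaks) by a
-- phased decomposition: group the lines into blank-delimited blocks, pick the first block with
-- non-heading content, then cut that paragraph to the length budget and truncate.

-- ===== PORT A =====
-- A's for-loop over text.splitlines() with the accumulating buf and its two breaks
def pvALoop (lines : List String) (buf : List String) (max_len : Int) : List String :=
  match lines with
  | [] => buf
  | l :: ls =>
    let line := PySem.Str.strip l
    if line = "" then
      if buf ≠ [] then buf else pvALoop ls buf max_len
    else if PySem.Str.startswith line "#" then
      pvALoop ls buf max_len
    else
      let buf' := buf ++ [line]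
      if max_len < ((buf'.map PySem.Str.len).sum) then buf' else pvALoop ls buf' max_len

-- A after the frontmatter strip
def pvAFrom (text : String) (max_len : Int) : String :=
  let buf := pvALoop (PySem.Str.splitlines text) [] max_len
  let out := PySem.Str.strip (PySem.Str.join " " buf)
  if max_len < PySem.Str.len out then
    PySem.Str.rstrip (PySem.Str.slice out none (some (max_len - 3))) ++ "..."
  else if out = "" then "Hermes workspace procedure (see body)." else out

def first_paragraph_excerpt (body : String) (max_len : Int) : String :=
  let text := PySem.Str.strip body
  let text :=
    if PySem.Str.startswith text "---" then
      let e := PySem.Str.findFrom text "\n---" 3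
      if e ≠ -1 then PySem.Str.lstrip (PySem.Str.slice text (some (e + 4)) none) else text
    else text
  pvAFrom text max_len

-- ===== PORT B =====
-- group the stripped lines into blank-line-delimited blocks (cur = pending block)
def pvBBlocks (lines : List String) (cur : List String) : List (List String) :=
  match lines with
  | [] => if cur = [] then [] else [cur]
  | raw :: ls =>
    let line := PySem.Str.strip raw
    if line ≠ "" then pvBBlocks ls (cur ++ [line])
    else if cur ≠ [] then cur :: pvBBlocks ls [] else pvBBlocks ls []

-- first block that still has content after dropping headings
def pvBPick (blocks : List (List String)) : List String :=
  match blocks with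
  | [] => []
  | blk :: rest =>
    let content := blk.filter (fun l => !PySem.Str.startswith l "#")
    if content ≠ [] then content else pvBPick rest

-- keep only as much of the paragraph as the excerpt budget can use (picked/total loop)
def pvBTake (para acc : List String) (total max_len : Int) : List String :=
  match para with
  | [] => acc
  | l :: r =>
    let acc' := acc ++ [l]
    let total' := total + PySem.Str.len l
    if max_len < total' then acc' else pvBTake r acc' total' max_len

-- B after the frontmatter strip
def pvBFrom (text : String) (max_len : Int) : String :=
  let para := pvBPick (pvBBlocks (PySem.Str.splitlines text) [])
  let picked := pvBTake para [] 0 max_len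
  let out := PySem.Str.join " " picked
  if max_len < PySem.Str.len out then
    PySem.Str.rstrip (PySem.Str.slice out none (some (max_len - 3))) ++ "..."
  else if out = "" then "Hermes workspace procedure (see body)." else out

def first_paragraph_excerpt_alt (body : String) (max_len : Int) : String :=
  let text := PySem.Str.strip body
  let text :=
    if PySem.Str.startswith text "---" then
      let e := PySem.Str.findFrom text "\n---" 3
      if e ≠ -1 then PySem.Str.lstrip (PySem.Str.slice text (some (e + 4)) none) else text
    else text
  pvBFrom text max_len

-- ===== PRECONDITION & SPEC =====
def Spec_first_paragraph_excerpt (body : String) (max_len : Int) (out : String) : Prop :=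
  out = first_paragraph_excerpt_alt body max_len
instance (body : String) (max_len : Int) (out : String) : Decidable (Spec_first_paragraph_excerpt body max_len out) := by
  unfold Spec_first_paragraph_excerpt; infer_instance

-- ===== CLAIM (what is proved, stated in full; the proofs are below) =====
def Claim_equal_first_paragraph_excerpt : Prop := ∀ (body : String) (max_len : Int), Dom_first_paragraph_excerpt body max_len → Spec_first_paragraph_excerpt body max_len (first_paragraph_excerpt body max_len)

-- ===== LEMMAS AND PROOFS =====

-- the content of a block = its lines that are not headings
def pvContent (cur : List String) : List String := cur.filter (fun l => !PySem.Str.startswith l "#")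

-- a "clean" string: nonempty, and neither end is whitespace (what strip() guarantees)
def pvClean (x : String) : Prop :=
  x.toList ≠ [] ∧ (∀ c ∈ x.toList.head?, PySem.Chars.isspace c = false) ∧
    (∀ c ∈ x.toList.getLast?, PySem.Chars.isspace c = false)

lemma pvContent_append_keep (cur : List String) (l : String)
    (h : PySem.Str.startswith l "#" = false) : pvContent (cur ++ [l]) = pvContent cur ++ [l] := by
  simp only [pvContent, List.filter_append, List.filter, h]
  simp

lemma pvContent_append_drop (cur : List String) (l : String)
    (h : PySem.Str.startswith l "#" = true) : pvContent (cur ++ [l]) = pvContent cur := by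
  simp only [pvContent, List.filter_append, List.filter, h]
  simp

lemma pvContent_ne_nil_of (cur : List String) (h : pvContent cur ≠ []) : cur ≠ [] := by
  intro hc; simp [pvContent, hc] at h

-- if the pending block already has content, that content is a prefix of the picked paragraph
lemma pvContent_def (cur : List String) :
    cur.filter (fun l => !PySem.Str.startswith l "#") = pvContent cur := rfl

lemma pvContent_prefix_append (cur : List String) (l : String) :
    pvContent cur <+: pvContent (cur ++ [l]) := by
  by_cases hs : PySem.Str.startswith l "#" = true
  · rw [pvContent_append_drop cur l hs]
  · rw [pvContent_append_keep cur l (by simpa using hs)]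
    exact ⟨[l], rfl⟩

lemma pick_prefix : ∀ (ls cur : List String), pvContent cur ≠ [] →
    pvContent cur <+: pvBPick (pvBBlocks ls cur) := by
  intro ls
  induction ls with
  | nil =>
    intro cur h
    have hc : cur ≠ [] := pvContent_ne_nil_of cur h
    simp only [pvBBlocks, if_neg hc, pvBPick, pvContent_def]
    rw [if_pos h]
  | cons raw ls ih =>
    intro cur h
    have hc : cur ≠ [] := pvContent_ne_nil_of cur h
    by_cases hl : PySem.Str.strip raw = ""
    · simp only [pvBBlocks, hl, ne_eq, not_true_eq_false, if_false, if_pos hc, pvBPick, pvContent_def]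
      rw [if_pos h]
    · simp only [pvBBlocks, ne_eq, hl, not_false_eq_true, if_true]
      have h2 : pvContent (cur ++ [PySem.Str.strip raw]) ≠ [] := by
        intro h0
        exact h (List.prefix_nil.mp (h0 ▸ pvContent_prefix_append cur (PySem.Str.strip raw)))
      exact (pvContent_prefix_append cur _).trans (ih _ h2)

-- A's loop result vs B's picked paragraph: equal, or A broke early on the length test and its
-- buffer is a nonempty over-long prefix of the paragraph
lemma sumlen_nonneg (c : List String) : 0 ≤ (c.map PySem.Str.len).sum := by
  apply List.sum_nonneg
  intro x hx
  obtain ⟨w, _, rfl⟩ := List.mem_map.mp hx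
  rw [PySem.Str.len_eq]
  positivity

lemma sumlen_append (c d : List String) :
    ((c ++ d).map PySem.Str.len).sum = (c.map PySem.Str.len).sum + (d.map PySem.Str.len).sum := by
  simp

lemma btake_absorb (ml : Int) : ∀ (c acc r : List String),
    (((acc ++ c).map PySem.Str.len).sum) ≤ ml →
    pvBTake (c ++ r) acc ((acc.map PySem.Str.len).sum) ml
      = pvBTake r (acc ++ c) (((acc ++ c).map PySem.Str.len).sum) ml := by
  intro c
  induction c with
  | nil => intro acc r _; simp
  | cons x c' ih =>
    intro acc r h
    have hx : (acc.map PySem.Str.len).sum + PySem.Str.len x = (((acc ++ [x]).map PySem.Str.len).sum) := by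
      simp
    have hle : (((acc ++ [x]).map PySem.Str.len).sum) ≤ ml := by
      have h0 := sumlen_nonneg c'
      rw [sumlen_append] at h ⊢
      rw [show ((x :: c').map PySem.Str.len).sum = PySem.Str.len x + (c'.map PySem.Str.len).sum by simp] at h
      simp only [List.map_cons, List.map_nil, List.sum_cons, List.sum_nil]
      omega
    have ih' := ih (acc ++ [x]) r (by rwa [List.append_assoc, List.singleton_append])
    rw [List.cons_append]
    simp only [pvBTake]
    rw [hx, if_neg (not_lt.mpr hle), ih', List.append_assoc, List.singleton_append]

lemma btake_all (ml : Int) (c : List String)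
    (h : c = [] ∨ (c.map PySem.Str.len).sum ≤ ml) : pvBTake c [] 0 ml = c := by
  rcases h with rfl | h
  · rfl
  · have h2 := btake_absorb ml c [] [] (by simpa using h)
    simpa using h2

lemma btake_break (ml : Int) (c : List String) (line : String) (rest : List String)
    (hc : c = [] ∨ (c.map PySem.Str.len).sum ≤ ml)
    (hb : ml < (((c ++ [line]).map PySem.Str.len).sum)) :
    pvBTake ((c ++ [line]) ++ rest) [] 0 ml = c ++ [line] := by
  rcases hc with rfl | hc
  · simp only [List.nil_append, List.cons_append, pvBTake]
    rw [if_pos (by simpa using hb)]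
  · have h2 := btake_absorb ml c [] ([line] ++ rest) (by simpa using hc)
    simp only [List.nil_append, List.map_nil, List.sum_nil] at h2
    rw [List.append_assoc, h2, List.singleton_append]
    simp only [pvBTake]
    rw [if_pos (by rw [sumlen_append] at hb; simpa using hb)]

-- A's loop result = B's picked paragraph cut to the budget (invariant: the buffer never
-- exceeds the budget unless A already returned)
lemma loop_vs_pick (ml : Int) : ∀ (ls cur : List String),
    (pvContent cur = [] ∨ ((pvContent cur).map PySem.Str.len).sum ≤ ml) →
    pvALoop ls (pvContent cur) ml = pvBTake (pvBPick (pvBBlocks ls cur)) [] 0 ml := by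
  intro ls
  induction ls with
  | nil =>
    intro cur H
    by_cases hc : cur = []
    · subst hc; simp [pvALoop, pvBBlocks, pvBPick, pvContent, pvBTake]
    · simp only [pvALoop, pvBBlocks, if_neg hc, pvBPick, pvContent_def]
      by_cases h : pvContent cur = []
      · rw [if_neg (by simpa using h), h]; rfl
      · rw [if_pos h]
        exact (btake_all ml _ H).symm
  | cons raw ls ih =>
    intro cur H
    by_cases hl : PySem.Str.strip raw = ""
    · by_cases h : pvContent cur = []
      · have h2 := ih [] (Or.inl rfl)
        simp only [pvContent, List.filter_nil] at h2
        rw [show pvALoop (raw :: ls) (pvContent cur) ml = pvALoop ls [] ml by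
              simp [pvALoop, hl, h],
            show pvBPick (pvBBlocks (raw :: ls) cur) = pvBPick (pvBBlocks ls []) by
              by_cases hc : cur = []
              · simp [pvBBlocks, hl, hc]
              · rw [show pvBBlocks (raw :: ls) cur = cur :: pvBBlocks ls [] by simp [pvBBlocks, hl, hc]]
                simp only [pvBPick, pvContent_def]
                rw [if_neg (by simp [h])]]
        exact h2
      · have hc : cur ≠ [] := pvContent_ne_nil_of cur h
        rw [show pvALoop (raw :: ls) (pvContent cur) ml = pvContent cur by
              simp [pvALoop, hl, h],
            show pvBBlocks (raw :: ls) cur = cur :: pvBBlocks ls [] by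
              simp [pvBBlocks, hl, hc]]
        simp only [pvBPick, pvContent_def]
        rw [if_pos h]
        exact (btake_all ml _ H).symm
    · by_cases hsh : PySem.Str.startswith (PySem.Str.strip raw) "#" = true
      · have hcont := pvContent_append_drop cur _ hsh
        have hshC : PySem.Chars.startswith (PySem.Chars.strip raw.toList) ['#'] = true := by
          simpa [PySem.Str.startswith, PySem.Str.strip] using hsh
        have h2 := ih (cur ++ [PySem.Str.strip raw]) (by rw [hcont]; exact H)
        rw [hcont] at h2
        rw [show pvALoop (raw :: ls) (pvContent cur) ml = pvALoop ls (pvContent cur) ml by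
              simp [pvALoop, hl, hshC],
            show pvBBlocks (raw :: ls) cur = pvBBlocks ls (cur ++ [PySem.Str.strip raw]) by
              simp [pvBBlocks, hl]]
        exact h2
      · have hsh' : PySem.Str.startswith (PySem.Str.strip raw) "#" = false := by simpa using hsh
        have hshC : PySem.Chars.startswith (PySem.Chars.strip raw.toList) ['#'] = false := by
          simpa [PySem.Str.startswith, PySem.Str.strip] using hsh'
        have hcont := pvContent_append_keep cur _ hsh'
        have hB : pvBBlocks (raw :: ls) cur = pvBBlocks ls (cur ++ [PySem.Str.strip raw]) := by
          simp [pvBBlocks, hl]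
        by_cases hbreak : ml < (((pvContent cur ++ [PySem.Str.strip raw]).map PySem.Str.len).sum)
        · rw [show pvALoop (raw :: ls) (pvContent cur) ml = pvContent cur ++ [PySem.Str.strip raw] by
                simp only [pvALoop, hl]
                simp only [ne_eq, if_false]
                rw [if_neg hsh, if_pos hbreak],
              hB]
          obtain ⟨rest, hrest⟩ := pick_prefix ls (cur ++ [PySem.Str.strip raw])
            (by rw [hcont]; simp)
          rw [← hrest, hcont]
          exact (btake_break ml _ _ rest H hbreak).symm
        · have h2 := ih (cur ++ [PySem.Str.strip raw])
            (by rw [hcont]; exact Or.inr (not_lt.mp hbreak))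
          rw [hcont] at h2
          rw [show pvALoop (raw :: ls) (pvContent cur) ml
                = pvALoop ls (pvContent cur ++ [PySem.Str.strip raw]) ml by
                simp only [pvALoop, hl]
                simp only [ne_eq, if_false]
                rw [if_neg hsh, if_neg hbreak],
              hB]
          exact h2

lemma head?_dropWhile_false {p : Char → Bool} {y : List Char} {c : Char}
    (hc : (List.dropWhile p y).head? = some c) : p c = false := by
  have hne : List.dropWhile p y ≠ [] := by intro h0; rw [h0] at hc; cases hc
  have h2 := List.head_dropWhile_not p hne
  rw [List.head?_eq_some_head hne, Option.some.injEq] at hc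
  rwa [hc] at h2

lemma clean_strip (l : String) (h : PySem.Str.strip l ≠ "") : pvClean (PySem.Str.strip l) := by
  have hts : (PySem.Str.strip l).toList =
      (List.dropWhile PySem.Chars.isspace
        ((List.dropWhile PySem.Chars.isspace l.toList).reverse)).reverse := by
    simp [PySem.Chars.strip, PySem.Chars.rstrip, PySem.Chars.lstrip]

  have hne : (PySem.Str.strip l).toList ≠ [] := by
    intro h0; exact h (String.toList_eq_nil_iff.mp h0)
  refine ⟨hne, ?_, ?_⟩
  · intro c hc
    rw [hts, List.head?_reverse] at hc
    have hzne : List.dropWhile PySem.Chars.isspace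
        ((List.dropWhile PySem.Chars.isspace l.toList).reverse) ≠ [] := by
      rw [hts] at hne; simpa using hne
    obtain ⟨t, ht⟩ := List.dropWhile_suffix (l := (List.dropWhile PySem.Chars.isspace l.toList).reverse)
      PySem.Chars.isspace
    have hgl : ((List.dropWhile PySem.Chars.isspace l.toList).reverse).getLast? = some c := by
      rw [← ht, List.getLast?_append, hc]; rfl
    rw [List.getLast?_reverse] at hgl
    exact head?_dropWhile_false hgl
  · intro c hc
    rw [hts, List.getLast?_reverse] at hc
    exact head?_dropWhile_false hc

lemma aloop_clean (ml : Int) : ∀ (ls buf : List String), (∀ x ∈ buf, pvClean x) →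
    ∀ x ∈ pvALoop ls buf ml, pvClean x := by
  intro ls
  induction ls with
  | nil => intro buf h; simpa [pvALoop] using h
  | cons raw ls ih =>
    intro buf h
    simp only [pvALoop]
    by_cases hl : PySem.Str.strip raw = ""
    · rw [if_pos hl]
      by_cases hb : buf ≠ []
      · rw [if_pos hb]; exact h
      · rw [if_neg hb]; exact ih buf h
    · rw [if_neg hl]
      by_cases hsh : PySem.Str.startswith (PySem.Str.strip raw) "#" = true
      · rw [if_pos hsh]; exact ih buf h
      · rw [if_neg hsh]
        have h' : ∀ x ∈ buf ++ [PySem.Str.strip raw], pvClean x := by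
          intro x hx
          rcases List.mem_append.mp hx with hx | hx
          · exact h x hx
          · rw [List.mem_singleton.mp hx]; exact clean_strip raw hl
        by_cases hb2 : ml < ((buf ++ [PySem.Str.strip raw]).map PySem.Str.len).sum
        · rw [if_pos hb2]; exact h'
        · rw [if_neg hb2]; exact ih _ h'

lemma lstrip_eq_self {cs : List Char} (h : ∀ c ∈ cs.head?, PySem.Chars.isspace c = false) :
    List.dropWhile PySem.Chars.isspace cs = cs := by
  cases cs with
  | nil => rfl
  | cons c t => rw [List.dropWhile_cons, if_neg (by simp [h c rfl])]

lemma intercalate_cons_cons (s x y : List Char) (l : List (List Char)) :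
    List.intercalate s (x :: y :: l) = x ++ s ++ List.intercalate s (y :: l) := by
  simp [List.intercalate, List.intersperse]

lemma intercalate_singleton (s x : List Char) : List.intercalate s [x] = x := by
  simp [List.intercalate, List.intersperse]

lemma join_ne_nil (s : List Char) (x : List Char) (rest : List (List Char)) (hx : x ≠ []) :
    List.intercalate s (x :: rest) ≠ [] := by
  cases rest with
  | nil => rw [intercalate_singleton]; exact hx
  | cons y r => rw [intercalate_cons_cons]; simp [hx]

lemma head?_intercalate (s x : List Char) (rest : List (List Char)) (hx : x ≠ []) :
    (List.intercalate s (x :: rest)).head? = x.head? := by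
  cases rest with
  | nil => rw [intercalate_singleton]
  | cons y r =>
    rw [intercalate_cons_cons, List.append_assoc, List.head?_append_of_ne_nil _ hx]

lemma getLast?_intercalate (s : List Char) : ∀ (a : List (List Char)), (∀ x ∈ a, x ≠ []) →
    ∀ c, (List.intercalate s a).getLast? = some c → ∃ x ∈ a, x.getLast? = some c := by
  intro a
  induction a with
  | nil => intro _ c hc; simp [List.intercalate] at hc
  | cons x rest ih =>
    intro h c hc
    cases rest with
    | nil => exact ⟨x, by simp, by rwa [intercalate_singleton] at hc⟩
    | cons y r =>
      rw [intercalate_cons_cons, List.append_assoc,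
        List.getLast?_append_of_ne_nil _ (l₂ := s ++ List.intercalate s (y :: r))
          (by simp [join_ne_nil s y r (h y (by simp))]),
        List.getLast?_append_of_ne_nil _ (join_ne_nil s y r (h y (by simp)))] at hc
      obtain ⟨z, hz, hzc⟩ := ih (fun u hu => h u (by simp [hu])) c hc
      exact ⟨z, by simp [hz], hzc⟩

lemma strip_join_eq (a : List String) (h : ∀ x ∈ a, pvClean x) :
    PySem.Str.strip (PySem.Str.join " " a) = PySem.Str.join " " a := by
  cases a with
  | nil => rfl
  | cons x rest =>
    rw [← String.toList_inj, PySem.Str.toList_strip, PySem.Str.toList_join, PySem.Chars.join]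
    have hx := h x (by simp)
    have hxl : x.toList ≠ [] := hx.1
    have hhead : ∀ c ∈ (List.intercalate " ".toList (List.map String.toList (x :: rest))).head?,
        PySem.Chars.isspace c = false := by
      intro c hc
      rw [List.map_cons, head?_intercalate _ _ _ hxl] at hc
      exact hx.2.1 c hc
    have hlast : ∀ c ∈ (List.intercalate " ".toList (List.map String.toList (x :: rest))).getLast?,
        PySem.Chars.isspace c = false := by
      intro c hc
      obtain ⟨z, hz, hzc⟩ := getLast?_intercalate _ (List.map String.toList (x :: rest))
        (by intro u hu
            obtain ⟨w, hw, rfl⟩ := List.mem_map.mp hu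
            exact (h w hw).1) c hc
      obtain ⟨w, hw, rfl⟩ := List.mem_map.mp hz
      exact (h w hw).2.2 c hzc
    show PySem.Chars.strip _ = _
    rw [PySem.Chars.strip, PySem.Chars.lstrip, lstrip_eq_self hhead, PySem.Chars.rstrip,
      lstrip_eq_self (by simpa [List.head?_reverse] using hlast), List.reverse_reverse]

-- the heart: after the (identical) frontmatter strip, the two computations agree
lemma from_eq (t : String) (ml : Int) : pvAFrom t ml = pvBFrom t ml := by
  have main := loop_vs_pick ml (PySem.Str.splitlines t) [] (Or.inl rfl)
  simp only [pvContent, List.filter_nil] at main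
  have hclean : ∀ x ∈ pvALoop (PySem.Str.splitlines t) [] ml, pvClean x :=
    aloop_clean ml (PySem.Str.splitlines t) [] (by simp)
  simp only [pvAFrom, pvBFrom]
  rw [← main, strip_join_eq _ hclean]

-- ===== VERDICT (by name: the statement is the Claim_ definition above) =====
theorem first_paragraph_excerpt_spec : Claim_equal_first_paragraph_excerpt := by
  intro body max_len _
  unfold Spec_first_paragraph_excerpt first_paragraph_excerpt first_paragraph_excerpt_alt
  exact from_eq _ _
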